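-- pv_equiv track=rewrite | github.com/EraserHead8/SEO_WIBE | app/services/wb_modules.py | _sanitize_person_name
-- ===== SOURCE A (Python) =====
-- def _sanitize_person_name(value: str) -> str:
--     raw = " ".join((value or "").split())
--     if not raw:
--         return ""
--     allowed = "".join(ch for ch in raw if ch.isalpha() or ch in {" ", "-"})
--     compact = " ".join(allowed.split()).strip(" -")
--     if len(compact) < 2:
--         return ""
--     return compact[:42]
-- ===== SOURCE B (Python) =====
-- def _sanitize_person_name(value: str) -> str:
--     out = []
--     pending = False
--     for ch in (value or ""):
--         if ch.isspace():
--             pending = True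
--         elif ch.isalpha() or ch == '-':
--             if pending and out:
--                 out.append(' ')
--             out.append(ch)
--             pending = False
--         # disallowed non-space chars are dropped; pending stays set so
--         # spaces around them still collapse to one
--     compact = ''.join(out).strip(' -')
--     if len(compact) < 2:
--         return ''
--     return compact[:42]
-- ===== Notes on version B (the rewrite author's own statement) =====
-- stated objective: alternative
-- what changed: Replaces A's multi-pass split/join/filter/split/join pipeline with a single left-to-right pass that keeps a pending-space flag (set on whitespace, consumed when the next letter/hyphen is emitted, unaffected by dropped characters), followed by the same strip/length/truncate finish.
import Mathlib
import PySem

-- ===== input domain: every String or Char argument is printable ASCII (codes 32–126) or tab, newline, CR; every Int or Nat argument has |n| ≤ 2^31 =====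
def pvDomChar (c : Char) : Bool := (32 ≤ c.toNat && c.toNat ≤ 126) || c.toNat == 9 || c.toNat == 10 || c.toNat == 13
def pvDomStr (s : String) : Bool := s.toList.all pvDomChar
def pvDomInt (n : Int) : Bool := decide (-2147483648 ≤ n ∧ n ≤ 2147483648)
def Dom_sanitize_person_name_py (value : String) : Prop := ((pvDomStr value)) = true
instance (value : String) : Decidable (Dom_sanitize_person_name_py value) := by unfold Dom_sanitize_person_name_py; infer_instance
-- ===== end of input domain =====

-- B replaces A's multi-pass split/join/filter pipeline by a single pass with a pending-space flag; same strip/length/truncate finish.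

-- ===== PORT A =====
-- literal port of A; '(value or "")' equals 'value' for a str argument
def sanitize_person_name_py (value : String) : String :=
  let raw := PySem.Chars.join [' '] (PySem.Chars.split₀ value.toList)
  if raw = [] then ""
  else
    let allowed := raw.filter (fun ch => PySem.Chars.isalpha ch || ch == ' ' || ch == '-')
    let compact := PySem.Chars.stripChars (PySem.Chars.join [' '] (PySem.Chars.split₀ allowed)) [' ', '-']
    if compact.length < 2 then ""
    else String.ofList (PySem.Chars.slice compact none (some 42))

-- ===== PORT B =====
def sanitize_person_name_py_alt (value : String) : String :=
  let st := value.toList.foldl (fun (acc : List Char × Bool) ch =>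
    if PySem.Chars.isspace ch then (acc.1, true)
    else if PySem.Chars.isalpha ch || ch == '-' then
      ((if acc.2 && !acc.1.isEmpty then acc.1 ++ [' '] else acc.1) ++ [ch], false)
    else acc) ([], false)
  let compact := PySem.Chars.stripChars st.1 [' ', '-']
  if compact.length < 2 then ""
  else String.ofList (PySem.Chars.slice compact none (some 42))

-- ===== PRECONDITION & SPEC =====
def Spec_sanitize_person_name_py (value : String) (out : String) : Prop := out = sanitize_person_name_py_alt value
instance (value : String) (out : String) : Decidable (Spec_sanitize_person_name_py value out) := by unfold Spec_sanitize_person_name_py; infer_instance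

-- ===== CLAIM (what is proved, stated in full; the proofs are below) =====
def Claim_equal_sanitize_person_name_py : Prop := ∀ (value : String), Dom_sanitize_person_name_py value → Spec_sanitize_person_name_py value (sanitize_person_name_py value)

-- ===== LEMMAS AND PROOFS =====

-- word characters kept by the sanitizer
def pvKeep (c : Char) : Bool := PySem.Chars.isalpha c || c == '-'

-- the character filter A applies to raw
def pvAllowed (c : Char) : Bool := PySem.Chars.isalpha c || c == ' ' || c == '-'

-- clean recursion computing str.split() (proved equal to PySem.Chars.split₀ below)
def pvWgo : List Char → List Char → List (List Char)
  | [], cur => if cur.isEmpty then [] else [cur.reverse]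
  | c :: s, cur =>
    if PySem.Chars.isspace c then
      (if cur.isEmpty then pvWgo s [] else cur.reverse :: pvWgo s [])
    else pvWgo s (c :: cur)

lemma pvGo_eq_wgo : ∀ (s cur : List Char) (acc : List (List Char)),
    PySem.Chars.split₀.go s cur acc = acc.reverse ++ pvWgo s cur := by
  intro s
  induction s with
  | nil =>
    intro cur acc
    simp only [PySem.Chars.split₀.go, pvWgo]
    by_cases h : cur.isEmpty <;> simp [h]
  | cons c s ih =>
    intro cur acc
    simp only [PySem.Chars.split₀.go, pvWgo]
    by_cases hs : PySem.Chars.isspace c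
    · by_cases h : cur.isEmpty <;> simp [hs, h, ih]
    · simp [hs, ih]

lemma pvSplit₀_eq_wgo (s : List Char) : PySem.Chars.split₀ s = pvWgo s [] := by
  simpa using pvGo_eq_wgo s [] []

-- words produced by split() are nonempty and whitespace-free
lemma pvWgo_sound : ∀ (s cur : List Char), (∀ c ∈ cur, PySem.Chars.isspace c = false) →
    ∀ w ∈ pvWgo s cur, w ≠ [] ∧ ∀ c ∈ w, PySem.Chars.isspace c = false := by
  intro s
  induction s with
  | nil =>
    intro cur hcur w hw
    cases cur with
    | nil => simp [pvWgo] at hw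
    | cons x xs =>
      simp [pvWgo] at hw
      subst hw
      exact ⟨by simp, fun c hc => hcur c (by rw [← List.reverse_cons] at hc; exact List.mem_reverse.mp hc)⟩
  | cons c s ih =>
    intro cur hcur w hw
    simp only [pvWgo] at hw
    by_cases hs : PySem.Chars.isspace c
    · cases cur with
      | nil => simp [hs] at hw; exact ih [] (by simp) w hw
      | cons x xs =>
        simp [hs] at hw
        rcases hw with hw | hw
        · subst hw
          exact ⟨by simp, fun d hd => hcur d (by rw [← List.reverse_cons] at hd; exact List.mem_reverse.mp hd)⟩
        · exact ih [] (by simp) w hw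
    · simp [hs] at hw
      refine ih (c :: cur) ?_ w hw
      intro d hd
      rcases List.mem_cons.mp hd with rfl | hd
      · simpa using hs
      · exact hcur d hd

-- join with a single-space separator, unfolded
lemma pvJoin_cons (a : List Char) (l : List (List Char)) :
    PySem.Chars.join [' '] (a :: l) =
      a ++ (if l = [] then [] else ' ' :: PySem.Chars.join [' '] l) := by
  cases l with
  | nil => simp [PySem.Chars.join, List.intercalate]
  | cons b t => simp [PySem.Chars.join, List.intercalate, List.intersperse]

lemma pvJoin_singleton (a : List Char) : PySem.Chars.join [' '] [a] = a := by
  rw [pvJoin_cons]; simp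

lemma pvJoin_ne_nil {l : List (List Char)} (hne : ∀ w ∈ l, w ≠ []) (hl : l ≠ []) :
    PySem.Chars.join [' '] l ≠ [] := by
  cases l with
  | nil => exact absurd rfl hl
  | cons a t =>
    rw [pvJoin_cons]
    have ha : a ≠ [] := hne a (by simp)
    cases a with
    | nil => exact absurd rfl ha
    | cons x xs => simp

-- filtering by the allowed set distributes over the single-space join
lemma pvFilter_join (l : List (List Char)) :
    (PySem.Chars.join [' '] l).filter pvAllowed =
      PySem.Chars.join [' '] (l.map (List.filter pvAllowed)) := by
  induction l with
  | nil => simp [PySem.Chars.join, List.intercalate]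
  | cons a t ih =>
    rw [pvJoin_cons, List.map_cons, pvJoin_cons]
    cases t with
    | nil => simp
    | cons b u =>
      rw [if_neg (by simp), if_neg (by simp), List.filter_append,
        List.filter_cons_of_pos (by decide : pvAllowed ' ' = true), ih]

-- on a whitespace-free word, the allowed filter is the keep filter
lemma pvFilter_word {w : List Char} (hw : ∀ c ∈ w, PySem.Chars.isspace c = false) :
    w.filter pvAllowed = w.filter pvKeep := by
  apply List.filter_congr
  intro c hc
  have hsp : PySem.Chars.isspace c = false := hw c hc
  have hne : c ≠ ' ' := by
    intro h; subst h; simp [PySem.Chars.isspace] at hsp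
  simp only [pvAllowed, pvKeep]
  have : (c == ' ') = false := by simpa using hne
  simp [this]

-- a whitespace-free block is consumed into the current word
lemma pvWgo_nonspace_block : ∀ (w s cur : List Char), (∀ c ∈ w, PySem.Chars.isspace c = false) →
    pvWgo (w ++ s) cur = pvWgo s (w.reverse ++ cur) := by
  intro w
  induction w with
  | nil => intro s cur _; simp
  | cons c w ih =>
    intro s cur hw
    have hc : PySem.Chars.isspace c = false := hw c (by simp)
    simp only [List.cons_append, pvWgo, hc, Bool.false_eq_true, if_false]
    rw [ih s (c :: cur) (fun d hd => hw d (by simp [hd]))]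
    simp

-- splitting a space-join of whitespace-free chunks drops exactly the empty chunks
lemma pvWgo_join (l : List (List Char)) (h : ∀ w ∈ l, ∀ c ∈ w, PySem.Chars.isspace c = false) :
    pvWgo (PySem.Chars.join [' '] l) [] = l.filter (fun w => !w.isEmpty) := by
  induction l with
  | nil => simp [pvWgo]
  | cons a t ih =>
    cases t with
    | nil =>
      have hblk := pvWgo_nonspace_block a [] [] (h a (by simp))
      rw [pvJoin_singleton, show pvWgo a [] = pvWgo (a ++ []) [] by simp, hblk]
      cases a with
      | nil => simp [pvWgo]
      | cons x xs => simp [pvWgo]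
    | cons b u =>
      have hblk := pvWgo_nonspace_block a (' ' :: PySem.Chars.join [' '] (b :: u)) [] (h a (by simp))
      rw [pvJoin_cons, if_neg (by simp), hblk]
      have hsp : PySem.Chars.isspace ' ' = true := by decide
      simp only [List.append_nil, pvWgo, hsp]
      rw [ih (fun w hw => h w (by simp [hw]))]
      cases a with
      | nil => simp
      | cons x xs => simp

-- the canonical result: keep-filtered words, empties dropped, joined by single spaces
def pvEmit (l : List (List Char)) : List Char :=
  PySem.Chars.join [' '] ((l.map (List.filter pvKeep)).filter (fun w => !w.isEmpty))

def pvE (s cur : List Char) : List Char := pvEmit (pvWgo s cur)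

lemma pvE_nil (cur : List Char) : pvE [] cur = (cur.filter pvKeep).reverse := by
  cases cur with
  | nil => simp [pvE, pvWgo, pvEmit, PySem.Chars.join, List.intercalate]
  | cons x xs =>
    simp only [pvE, pvWgo, List.isEmpty_cons, Bool.false_eq_true, if_false, pvEmit,
      List.map_cons, List.map_nil, ← List.filter_reverse]
    cases hk : (x :: xs).reverse.filter pvKeep with
    | nil => simp [PySem.Chars.join, List.intercalate]
    | cons y ys => simp [List.filter]

lemma pvE_cons_nonspace {c : Char} (hc : PySem.Chars.isspace c = false) (s cur : List Char) :
    pvE (c :: s) cur = pvE s (c :: cur) := by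
  simp [pvE, pvWgo, hc]

lemma pvE_cons_space {c : Char} (hc : PySem.Chars.isspace c = true) (s cur : List Char) :
    pvE (c :: s) cur =
      (if (cur.filter pvKeep).reverse = [] then pvE s []
       else (cur.filter pvKeep).reverse ++ (if pvE s [] = [] then [] else ' ' :: pvE s [])) := by
  have hw : pvWgo (c :: s) cur = (if cur.isEmpty then pvWgo s [] else cur.reverse :: pvWgo s []) := by
    simp [pvWgo, hc]
  cases cur with
  | nil => simp [pvE, hw]
  | cons x xs =>
    simp only [List.isEmpty_cons, Bool.false_eq_true, if_false] at hw
    rw [show pvE (c :: s) (x :: xs) = pvEmit (pvWgo (c :: s) (x :: xs)) from rfl, hw,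
      show pvEmit ((x :: xs).reverse :: pvWgo s []) = PySem.Chars.join [' ']
        ((((x :: xs).reverse.filter pvKeep) :: (pvWgo s []).map (List.filter pvKeep)).filter
          (fun w => !w.isEmpty)) from rfl,
      List.filter_reverse]
    cases hk : (List.filter pvKeep (x :: xs)).reverse with
    | nil =>
      rw [List.filter_cons_of_neg (by simp)]
      simp [pvE, pvEmit]
    | cons y ys =>
      rw [List.filter_cons_of_pos (by simp), if_neg (by simp), pvJoin_cons]
      congr 1
      simp only [pvE, pvEmit]
      cases hrest : ((pvWgo s []).map (List.filter pvKeep)).filter (fun w => !w.isEmpty) with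
      | nil => simp [PySem.Chars.join, List.intercalate]
      | cons r rs =>
        have hjoin : PySem.Chars.join [' '] (r :: rs) ≠ [] := by
          apply pvJoin_ne_nil _ (by simp)
          intro w hw
          have := List.of_mem_filter (hrest ▸ hw)
          simpa [List.isEmpty_iff] using this
        simp [hjoin]

-- B's continuation: characters still to be appended, given the pending-space flag
-- and whether anything has been emitted yet
def pvTail : List Char → Bool → Bool → List Char
  | [], _, _ => []
  | c :: s, p, n =>
    if PySem.Chars.isspace c then pvTail s true n
    else if pvKeep c then (if p && n then [' '] else []) ++ c :: pvTail s false true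
    else pvTail s p n

lemma pvTail_space {c : Char} (hc : PySem.Chars.isspace c = true) (s : List Char) (p n : Bool) :
    pvTail (c :: s) p n = pvTail s true n := by simp [pvTail, hc]

lemma pvTail_keep {c : Char} (hc : PySem.Chars.isspace c = false) (hk : pvKeep c = true)
    (s : List Char) (p n : Bool) :
    pvTail (c :: s) p n = (if p && n then [' '] else []) ++ c :: pvTail s false true := by
  simp [pvTail, hc, hk]

lemma pvTail_drop {c : Char} (hc : PySem.Chars.isspace c = false) (hk : pvKeep c = false)
    (s : List Char) (p n : Bool) :
    pvTail (c :: s) p n = pvTail s p n := by simp [pvTail, hc, hk]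

-- the coupled invariant between A's canonical form and B's continuation
lemma pvCD : ∀ (s cur : List Char), (∀ c ∈ cur, PySem.Chars.isspace c = false) →
    ((cur.filter pvKeep ≠ [] → pvE s cur = (cur.filter pvKeep).reverse ++ pvTail s false true)
     ∧ (cur.filter pvKeep = [] → ∀ p n : Bool, (n = true → p = true) →
          pvTail s p n = if p && n && !(pvE s cur).isEmpty then ' ' :: pvE s cur else pvE s cur)) := by
  intro s
  induction s with
  | nil =>
    intro cur hcur
    constructor
    · intro hk
      simp [pvE_nil, pvTail]
    · intro hk p n _
      simp [pvE_nil, pvTail, hk]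
  | cons c s ih =>
    intro cur hcur
    by_cases hsp : PySem.Chars.isspace c
    · constructor
      · intro hk
        have hcond : ¬ (List.filter pvKeep cur).reverse = [] := by simpa using hk
        rw [pvE_cons_space hsp, if_neg hcond, pvTail_space hsp]
        have hD := (ih [] (by simp)).2 (by simp) true true (by simp)
        rw [hD]
        congr 1
        cases he : pvE s [] with
        | nil => simp
        | cons z zs => simp
      · intro hk p n hpn
        have hcond : (List.filter pvKeep cur).reverse = [] := by simp [hk]
        rw [pvE_cons_space hsp, if_pos hcond, pvTail_space hsp]
        have hD := (ih [] (by simp)).2 (by simp) true n (by simp)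
        rw [hD]
        cases n with
        | false => simp
        | true => rw [hpn rfl]
    · have hsp' : PySem.Chars.isspace c = false := by simpa using hsp
      have hcur' : ∀ d ∈ c :: cur, PySem.Chars.isspace d = false := by
        intro d hd
        rcases List.mem_cons.mp hd with rfl | hd
        · exact hsp'
        · exact hcur d hd
      by_cases hkc : pvKeep c
      · have hfil : (c :: cur).filter pvKeep = c :: cur.filter pvKeep :=
          List.filter_cons_of_pos hkc
        have hC := (ih (c :: cur) hcur').1 (by simp [hfil])
        rw [hfil] at hC
        constructor
        · intro hk
          rw [pvE_cons_nonspace hsp', hC, pvTail_keep hsp' hkc]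
          simp
        · intro hk p n hpn
          rw [pvE_cons_nonspace hsp', hC, hk, pvTail_keep hsp' hkc]
          cases p <;> cases n <;> simp_all
      · have hkc' : pvKeep c = false := by simpa using hkc
        have hfil : (c :: cur).filter pvKeep = cur.filter pvKeep :=
          List.filter_cons_of_neg (by simp [hkc'])
        constructor
        · intro hk
          rw [pvE_cons_nonspace hsp',
            (ih (c :: cur) hcur').1 (by simpa [hfil] using hk), hfil,
            pvTail_drop hsp' hkc']
        · intro hk p n hpn
          rw [pvE_cons_nonspace hsp', pvTail_drop hsp' hkc',
            (ih (c :: cur) hcur').2 (by simpa [hfil] using hk) p n hpn]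

-- B's fold, expressed through pvTail
lemma pvFoldl_eq_tail : ∀ (s : List Char) (out : List Char) (p : Bool),
    (s.foldl (fun (acc : List Char × Bool) ch =>
      if PySem.Chars.isspace ch then (acc.1, true)
      else if PySem.Chars.isalpha ch || ch == '-' then
        ((if acc.2 && !acc.1.isEmpty then acc.1 ++ [' '] else acc.1) ++ [ch], false)
      else acc) (out, p)).1 = out ++ pvTail s p !out.isEmpty := by
  intro s
  induction s with
  | nil => intro out p; simp [pvTail]
  | cons c s ih =>
    intro out p
    by_cases hsp : PySem.Chars.isspace c
    · rw [List.foldl_cons, if_pos hsp, pvTail_space hsp]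
      exact ih out true
    · have hsp' : PySem.Chars.isspace c = false := by simpa using hsp
      by_cases hkc : PySem.Chars.isalpha c || c == '-'
      · rw [List.foldl_cons, if_neg (by simp [hsp']), if_pos hkc,
          pvTail_keep hsp' (by simpa [pvKeep] using hkc), ih]
        have hne : ((if p && !out.isEmpty then out ++ [' '] else out) ++ [c]).isEmpty = false := by
          by_cases h : p && !out.isEmpty <;> simp [h]
        rw [hne]
        by_cases h : p && !out.isEmpty <;> simp [h]
      · have hkc' : (PySem.Chars.isalpha c || c == '-') = false := by simpa using hkc
        rw [List.foldl_cons, if_neg (by simp [hsp']), if_neg (by simp [hkc']),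
          pvTail_drop hsp' (by simpa [pvKeep] using hkc')]
        exact ih out p

-- A's pipeline produces exactly pvE of the input
lemma pvA_core (cs : List Char) :
    PySem.Chars.join [' ']
      (PySem.Chars.split₀
        ((PySem.Chars.join [' '] (PySem.Chars.split₀ cs)).filter pvAllowed)) = pvE cs [] := by
  have hsound := pvWgo_sound cs [] (by simp)
  rw [pvSplit₀_eq_wgo cs, pvFilter_join]
  have hmap : (pvWgo cs []).map (List.filter pvAllowed) =
      (pvWgo cs []).map (List.filter pvKeep) := by
    apply List.map_congr_left
    intro w hw
    exact pvFilter_word (hsound w hw).2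
  rw [hmap, pvSplit₀_eq_wgo, pvWgo_join]
  · rfl
  · intro w hw c hc
    rcases List.mem_map.mp hw with ⟨v, hv, rfl⟩
    exact (hsound v hv).2 c (List.mem_of_mem_filter hc)

-- B's single pass produces exactly pvE of the input
lemma pvB_core (cs : List Char) :
    (cs.foldl (fun (acc : List Char × Bool) ch =>
      if PySem.Chars.isspace ch then (acc.1, true)
      else if PySem.Chars.isalpha ch || ch == '-' then
        ((if acc.2 && !acc.1.isEmpty then acc.1 ++ [' '] else acc.1) ++ [ch], false)
      else acc) ([], false)).1 = pvE cs [] := by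
  rw [pvFoldl_eq_tail cs [] false]
  simp only [List.nil_append, List.isEmpty_nil, Bool.not_true]
  rw [(pvCD cs [] (by simp)).2 (by simp) false false (by simp)]
  simp

-- if A's first join is empty there are no words at all
lemma pvRaw_nil (cs : List Char) (h : PySem.Chars.join [' '] (PySem.Chars.split₀ cs) = []) :
    pvE cs [] = [] := by
  rw [pvSplit₀_eq_wgo] at h
  have hsound := pvWgo_sound cs [] (by simp)
  cases hws : pvWgo cs [] with
  | nil => simp [pvE, hws, pvEmit, PySem.Chars.join, List.intercalate]
  | cons w t =>
    exfalso
    rw [hws] at h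
    exact pvJoin_ne_nil (fun x hx => (hsound x (hws ▸ hx)).1) (by simp) h

-- ===== VERDICT (by name: the statement is the Claim_ definition above) =====
theorem sanitize_person_name_py_spec : Claim_equal_sanitize_person_name_py := by
  intro value _
  unfold Spec_sanitize_person_name_py sanitize_person_name_py sanitize_person_name_py_alt
  simp only [pvB_core value.toList]
  by_cases h : PySem.Chars.join [' '] (PySem.Chars.split₀ value.toList) = []
  · rw [if_pos h, pvRaw_nil value.toList h]
    simp [PySem.Chars.stripChars]
  · rw [if_neg h,
      show (PySem.Chars.join [' '] (PySem.Chars.split₀ value.toList)).filter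
          (fun ch => PySem.Chars.isalpha ch || ch == ' ' || ch == '-') =
        (PySem.Chars.join [' '] (PySem.Chars.split₀ value.toList)).filter pvAllowed from rfl,
      pvA_core value.toList]
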